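-- pv_equiv track=rewrite | github.com/joannasia9/mgr_system | cluster_faces/cluster_faces.py | filter_ids
-- ===== SOURCE A (Python) =====
-- from itertools import groupby
-- from operator import itemgetter
--
-- def filter_ids(labels, frames_ids):
--     tuples = zip(labels, frames_ids)
--     groups = [(label, list(list(zip(*index))[1])) for label, index in groupby(tuples, itemgetter(0))]
--     outliers = [group[1] for group in groups if group[0] == -1]
--     groups = [group for group in groups if group[0] != -1]
--
--     ids_to_take = []
--     for outlier_group in outliers:
--         ids_to_take.extend(outlier_group)
--
--     ids_to_take.extend([group[1][0] for group in groups])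
--     return ids_to_take
-- ===== SOURCE B (Python) =====
-- def filter_ids(labels, frames_ids):
--     n = min(len(labels), len(frames_ids))
--     outliers = [frames_ids[i] for i in range(n) if labels[i] == -1]
--     firsts = [frames_ids[i] for i in range(n)
--               if labels[i] != -1 and (i == 0 or labels[i - 1] != labels[i])]
--     return outliers + firsts
-- ===== Notes on version B (the rewrite author's own statement) =====
-- stated objective: faster
-- what changed: Replaces the groupby pipeline (materialized per-run id lists, two filters over the group list, an extend loop) with two stateless index-based comprehensions: one collecting ids where labels[i] == -1, one collecting ids at run boundaries detected by comparing labels[i-1] with labels[i].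
import Mathlib
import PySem

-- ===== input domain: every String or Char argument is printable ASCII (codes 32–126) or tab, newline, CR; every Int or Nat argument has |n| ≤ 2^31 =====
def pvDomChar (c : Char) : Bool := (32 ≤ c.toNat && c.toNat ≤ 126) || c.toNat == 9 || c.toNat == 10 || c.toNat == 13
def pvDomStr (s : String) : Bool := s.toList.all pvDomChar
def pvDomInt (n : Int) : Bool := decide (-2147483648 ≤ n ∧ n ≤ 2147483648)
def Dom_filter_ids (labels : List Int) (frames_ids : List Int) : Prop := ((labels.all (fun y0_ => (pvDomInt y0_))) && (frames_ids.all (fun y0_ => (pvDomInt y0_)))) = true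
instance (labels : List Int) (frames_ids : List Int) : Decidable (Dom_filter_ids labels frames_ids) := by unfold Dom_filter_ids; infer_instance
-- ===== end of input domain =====

-- B replaces A's groupby pipeline (materialized per-run id lists, two filters over the group
-- list, an extend loop) with two stateless index-based comprehensions (objective: faster, measured).

-- ===== PORT A =====
-- itertools.groupby on the zipped (label, id) pairs, each group rendered as
-- (label, list of ids of the run) — exactly what A's comprehension computes.
def pvGroupRuns : List (Int × Int) → List (Int × List Int)
  | [] => []
  | (l, i) :: t =>
    (l, i :: (t.takeWhile (fun p => p.1 == l)).map (fun p => p.2)) ::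
      pvGroupRuns (t.dropWhile (fun p => p.1 == l))
termination_by l => l.length
decreasing_by
  have := List.length_dropWhile_le (fun p : Int × Int => p.1 == l) t
  simp; omega

def filter_ids (labels : List Int) (frames_ids : List Int) : List Int :=
  let tuples := labels.zip frames_ids
  let groups := pvGroupRuns tuples
  let outliers := (groups.filter (fun g => g.1 == -1)).map (fun g => g.2)
  let groups2 := groups.filter (fun g => g.1 != -1)
  let ids_to_take := outliers.foldl (fun acc og => acc ++ og) []
  -- group[1][0]: every groupby group is nonempty, so headD's default is never used
  ids_to_take ++ groups2.map (fun g => g.2.headD 0)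

-- ===== PORT B =====
-- n = min(len(labels), len(frames_ids)) (zip truncation); frames_ids[i] / labels[i]
-- with 0 ≤ i < n are always in range, so getD's default is never used
def filter_ids_alt (labels : List Int) (frames_ids : List Int) : List Int :=
  let n := min labels.length frames_ids.length
  let outliers := ((List.range n).filter (fun i => labels.getD i 0 == -1)).map
    (fun i => frames_ids.getD i 0)
  let firsts := ((List.range n).filter (fun i =>
      labels.getD i 0 != -1 && (i == 0 || labels.getD (i - 1) 0 != labels.getD i 0))).map
    (fun i => frames_ids.getD i 0)
  outliers ++ firsts

-- ===== PRECONDITION & SPEC =====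
def Spec_filter_ids (labels : List Int) (frames_ids : List Int) (out : List Int) : Prop := out = filter_ids_alt labels frames_ids
instance (labels : List Int) (frames_ids : List Int) (out : List Int) : Decidable (Spec_filter_ids labels frames_ids out) := by unfold Spec_filter_ids; infer_instance

-- ===== CLAIM (what is proved, stated in full; the proofs are below) =====
def Claim_equal_filter_ids : Prop := ∀ (labels : List Int) (frames_ids : List Int), Dom_filter_ids labels frames_ids → Spec_filter_ids labels frames_ids (filter_ids labels frames_ids)

-- ===== LEMMAS AND PROOFS =====

-- forward "specification" recursions: the -1 ids, and the run-boundary ids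
def pvO : List (Int × Int) → List Int
  | [] => []
  | p :: t => if p.1 = -1 then p.2 :: pvO t else pvO t

def pvF : Option Int → List (Int × Int) → List Int
  | _, [] => []
  | prev, p :: t =>
    if p.1 = -1 then pvF (some p.1) t
    else if prev ≠ some p.1 then p.2 :: pvF (some p.1) t
    else pvF (some p.1) t

lemma pvO_skip (l : Int) (s rest : List (Int × Int)) (hs : ∀ p ∈ s, p.1 = l) :
    pvO (s ++ rest) = (if l = -1 then s.map (fun p => p.2) else []) ++ pvO rest := by
  induction s with
  | nil => simp
  | cons p s ih =>
    have hp := hs p (by simp)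
    have ih' := ih (fun q hq => hs q (by simp [hq]))
    by_cases h : l = -1
    · subst h; simp [pvO, hp, ih']
    · simp [pvO, hp, h, ih']

lemma pvF_skip (l : Int) (s rest : List (Int × Int)) (hs : ∀ p ∈ s, p.1 = l) :
    pvF (some l) (s ++ rest) = pvF (some l) rest := by
  induction s with
  | nil => simp
  | cons p s ih =>
    have hp := hs p (by simp)
    have ih' := ih (fun q hq => hs q (by simp [hq]))
    simp [pvF, hp, ih']

lemma pv_dropWhile_head {α : Type} (q : α → Bool) :
    ∀ (t : List α) (x : α), (t.dropWhile q).head? = some x → q x = false := by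
  intro t
  induction t with
  | nil => intro x h; simp [List.dropWhile] at h
  | cons a t ih =>
    intro x h
    by_cases ha : q a
    · exact ih x (by simpa [List.dropWhile, ha] using h)
    · simp [List.dropWhile, ha] at h
      subst h; simpa using ha

-- A's group pipeline equals the forward recursions, via the run structure of groupby
lemma pvA_runs (pairs : List (Int × Int)) : ∀ (prev : Option Int),
    (∀ x, pairs.head? = some x → prev ≠ some x.1) →
    (((pvGroupRuns pairs).filter (fun g => g.1 == -1)).map (fun g => g.2)).flatten = pvO pairs ∧
    ((pvGroupRuns pairs).filter (fun g => g.1 != -1)).map (fun g => g.2.headD 0) = pvF prev pairs := by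
  induction pairs using pvGroupRuns.induct with
  | case1 => intro prev _; simp [pvGroupRuns, pvO, pvF]
  | case2 l i t ih =>
    intro prev hprev
    have hsplit := List.takeWhile_append_dropWhile (p := fun p : Int × Int => p.1 == l) (l := t)
    have hs : ∀ p ∈ t.takeWhile (fun p : Int × Int => p.1 == l), p.1 = l := by
      intro p hp
      simpa using List.mem_takeWhile_imp hp
    have hrest : ∀ x, (t.dropWhile (fun p : Int × Int => p.1 == l)).head? = some x → (some l : Option Int) ≠ some x.1 := by
      intro x hx hlx
      have hfalse := pv_dropWhile_head (fun p : Int × Int => p.1 == l) _ x hx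
      simp at hfalse
      exact hfalse (by simpa using hlx.symm)
    obtain ⟨ihO, ihF⟩ := ih (some l) hrest
    have hne : prev ≠ some l := fun h => hprev (l, i) rfl (by simpa using h)
    have htO : pvO t = (if l = -1 then (t.takeWhile (fun p : Int × Int => p.1 == l)).map (fun p => p.2) else []) ++ pvO (t.dropWhile (fun p : Int × Int => p.1 == l)) := by
      conv_lhs => rw [← hsplit]
      exact pvO_skip l _ _ hs
    have htF : pvF (some l) t = pvF (some l) (t.dropWhile (fun p : Int × Int => p.1 == l)) := by
      conv_lhs => rw [← hsplit]
      exact pvF_skip l _ _ hs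
    constructor
    · rw [pvGroupRuns]
      by_cases h : l = -1
      · subst h
        simp only [pvO, htO]
        simp [ihO]
      · have : pvO ((l, i) :: t) = pvO t := by simp [pvO, h]
        rw [this, htO]
        simp [h, ihO]
    · rw [pvGroupRuns]
      by_cases h : l = -1
      · subst h
        have : pvF prev (((-1 : Int), i) :: t) = pvF (some (-1)) t := by simp [pvF]
        rw [this, htF]
        simp
        simpa using ihF
      · have : pvF prev ((l, i) :: t) = i :: pvF (some l) t := by simp [pvF, h, hne]
        rw [this, htF]
        simp [h]
        simpa using ihF

lemma pv_foldl_flatten (l : List (List Int)) : ∀ acc, l.foldl (fun acc og => acc ++ og) acc = acc ++ l.flatten := by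
  induction l with
  | nil => simp
  | cons a l ih => intro acc; simp [ih, List.append_assoc]

-- B's index comprehensions equal the forward recursions over the pair list
lemma pvO_idx (ps : List (Int × Int)) :
    ((List.range ps.length).filter (fun i => (ps.getD i (0, 0)).1 == -1)).map
      (fun i => (ps.getD i (0, 0)).2) = pvO ps := by
  induction ps with
  | nil => simp [pvO]
  | cons p t ih =>
    have e1 : ((fun i => ((p :: t).getD i (0, 0)).1 == -1) ∘ Nat.succ) =
        (fun i => (t.getD i (0, 0)).1 == -1) := by funext i; simp
    rw [List.length_cons, List.range_succ_eq_map, List.filter_cons, List.filter_map, e1]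
    by_cases h : p.1 = -1
    · rw [if_pos (by simpa using h)]
      simp only [List.map_cons, List.map_map]
      have e2 : ((fun i => ((p :: t).getD i (0, 0)).2) ∘ Nat.succ) =
          (fun i => (t.getD i (0, 0)).2) := by funext i; simp
      rw [e2, ih]
      simp [pvO, h]
    · rw [if_neg (by simpa using h)]
      simp only [List.map_map]
      have e2 : ((fun i => ((p :: t).getD i (0, 0)).2) ∘ Nat.succ) =
          (fun i => (t.getD i (0, 0)).2) := by funext i; simp
      rw [e2, ih]
      simp [pvO, h]

lemma pvF_idx (ps : List (Int × Int)) : ∀ (prev : Option Int),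
    ((List.range ps.length).filter (fun i =>
        ((ps.getD i (0, 0)).1 != -1) &&
        ((if i = 0 then prev else some ((ps.getD (i - 1) (0, 0)).1)) != some ((ps.getD i (0, 0)).1)))).map
      (fun i => (ps.getD i (0, 0)).2) = pvF prev ps := by
  induction ps with
  | nil => intro prev; simp [pvF]
  | cons p t ih =>
    intro prev
    have e1 : ((fun i => (((p :: t).getD i (0, 0)).1 != -1) &&
          ((if i = 0 then prev else some (((p :: t).getD (i - 1) (0, 0)).1)) !=
            some (((p :: t).getD i (0, 0)).1))) ∘ Nat.succ) =
        (fun i => ((t.getD i (0, 0)).1 != -1) &&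
          ((if i = 0 then (some p.1) else some ((t.getD (i - 1) (0, 0)).1)) !=
            some ((t.getD i (0, 0)).1))) := by
      funext i
      cases i with
      | zero => simp
      | succ j => simp
    have e2 : ((fun i => ((p :: t).getD i (0, 0)).2) ∘ Nat.succ) =
        (fun i => (t.getD i (0, 0)).2) := by funext i; simp
    rw [List.length_cons, List.range_succ_eq_map, List.filter_cons, List.filter_map, e1]
    by_cases h1 : p.1 = -1
    · rw [if_neg (by simp [h1])]
      simp only [List.map_map]
      rw [e2, ih (some p.1)]
      simp [pvF, h1]
    · by_cases h2 : prev = some p.1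
      · rw [if_neg (by simp [h2])]
        simp only [List.map_map]
        rw [e2, ih (some p.1)]
        simp [pvF, h1, h2]
      · rw [if_pos (by simp [h1, h2])]
        simp only [List.map_cons, List.map_map]
        rw [e2, ih (some p.1)]
        simp [pvF, h1, h2]

lemma pv_zip_getD (labels frames_ids : List Int) (i : Nat)
    (hi : i < min labels.length frames_ids.length) :
    (labels.zip frames_ids).getD i (0, 0) = (labels.getD i 0, frames_ids.getD i 0) := by
  have h1 : i < labels.length := lt_of_lt_of_le hi (min_le_left _ _)
  have h2 : i < frames_ids.length := lt_of_lt_of_le hi (min_le_right _ _)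
  have hz : i < (labels.zip frames_ids).length := by simpa [List.length_zip] using hi
  simp [List.getD, h1, h2, List.getElem_zip]

-- B's port rewritten over the zipped pair list
lemma pvB_pairs (labels frames_ids : List Int) :
    filter_ids_alt labels frames_ids =
      pvO (labels.zip frames_ids) ++ pvF none (labels.zip frames_ids) := by
  simp only [filter_ids_alt]
  have hlen : (labels.zip frames_ids).length = min labels.length frames_ids.length :=
    List.length_zip
  set ps := labels.zip frames_ids with hps
  rw [← pvO_idx ps, ← pvF_idx ps none, ← hlen]
  congr 1
  · have hf : (List.range ps.length).filter (fun i => labels.getD i 0 == -1) =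
        (List.range ps.length).filter (fun i => (ps.getD i (0, 0)).1 == -1) := by
      apply List.filter_congr
      intro i hi
      have hi' : i < min labels.length frames_ids.length := by
        simpa [hlen] using List.mem_range.1 hi
      rw [pv_zip_getD labels frames_ids i hi']
    rw [hf]
    apply List.map_congr_left
    intro i hi
    have hi' : i < min labels.length frames_ids.length := by
      have := List.mem_filter.1 hi
      simpa [hlen] using List.mem_range.1 this.1
    rw [pv_zip_getD labels frames_ids i hi']
  · have hf : (List.range ps.length).filter (fun i =>
          labels.getD i 0 != -1 && (i == 0 || labels.getD (i - 1) 0 != labels.getD i 0)) =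
        (List.range ps.length).filter (fun i =>
          ((ps.getD i (0, 0)).1 != -1) &&
          ((if i = 0 then (none : Option Int) else some ((ps.getD (i - 1) (0, 0)).1)) !=
            some ((ps.getD i (0, 0)).1))) := by
      apply List.filter_congr
      intro i hi
      have hi' : i < min labels.length frames_ids.length := by
        simpa [hlen] using List.mem_range.1 hi
      rw [pv_zip_getD labels frames_ids i hi']
      cases i with
      | zero => simp
      | succ j =>
        have hj : j < min labels.length frames_ids.length := Nat.lt_of_succ_lt hi'
        simp only [hps, Nat.add_sub_cancel]
        rw [pv_zip_getD labels frames_ids j hj]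
        simp only [List.getD]
        by_cases hab : labels[j]?.getD 0 = labels[j + 1]?.getD 0 <;> simp [bne, hab]
    rw [hf]
    apply List.map_congr_left
    intro i hi
    have hi' : i < min labels.length frames_ids.length := by
      have := List.mem_filter.1 hi
      simpa [hlen] using List.mem_range.1 this.1
    rw [pv_zip_getD labels frames_ids i hi']

-- ===== VERDICT (by name: the statement is the Claim_ definition above) =====
theorem filter_ids_spec : Claim_equal_filter_ids := by
  intro labels frames_ids _
  unfold Spec_filter_ids
  obtain ⟨hO, hF⟩ := pvA_runs (labels.zip frames_ids) none (by simp)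
  rw [pvB_pairs]
  unfold filter_ids
  simp only [pv_foldl_flatten, List.nil_append]
  rw [hO, hF]
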